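-- pv_equiv track=rewrite | github.com/miliar/Code_Jam_Webscraper | solutions_python/Problem_210/248.py | zeit
-- ===== SOURCE A (Python) =====
-- def zeit(p, z):
--     t = 0
--     for i in range(len(z) - 1):
--         if z[i][0] == p:
--             t += z[i+1][1] - z[i][1]
--     if z[-1][0] == p:
--         t += (1440 - z[-1][1]) + z[0][1]
--     return t
-- ===== SOURCE B (Python) =====
-- def zeit(p, z):
--     # Signed-contribution reformulation: instead of summing gaps to the next
--     # entry, each start time s contributes +s when the (cyclically) previous
--     # entry belongs to p and -s when its own entry belongs to p; the wrap
--     # contributes a flat 1440 when the last entry belongs to p.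
--     t = 1440 if z[-1][0] == p else 0
--     prev = z[-1][0]
--     for q, s in z:
--         if prev == p:
--             t += s
--         if q == p:
--             t -= s
--         prev = q
--     return t
-- ===== Notes on version B (the rewrite author's own statement) =====
-- stated objective: alternative
-- what changed: B never computes a gap z[i+1][1]-z[i][1]: it telescopes the sum into signed per-element contributions (+s when the cyclic predecessor is p, -s when the entry itself is p, plus a flat 1440 for the wrap), a single fold carrying only the previous id.
import Mathlib
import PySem

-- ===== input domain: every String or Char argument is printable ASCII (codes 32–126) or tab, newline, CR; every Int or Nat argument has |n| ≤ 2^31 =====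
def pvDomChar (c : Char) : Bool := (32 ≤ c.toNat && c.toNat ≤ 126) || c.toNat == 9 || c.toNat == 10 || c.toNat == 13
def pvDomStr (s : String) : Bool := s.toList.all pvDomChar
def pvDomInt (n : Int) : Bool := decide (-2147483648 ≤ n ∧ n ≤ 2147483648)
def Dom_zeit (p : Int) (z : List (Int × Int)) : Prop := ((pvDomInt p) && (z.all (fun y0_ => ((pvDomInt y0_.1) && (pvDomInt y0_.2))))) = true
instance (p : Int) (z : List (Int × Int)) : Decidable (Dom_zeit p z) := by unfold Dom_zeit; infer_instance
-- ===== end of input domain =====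

-- B replaces A's gap sums z[i+1][1]-z[i][1] by a telescoped signed-contribution fold:
-- each start contributes +s when the cyclic predecessor is p and -s when the entry itself
-- is p, plus a flat 1440 when the last entry is p (objective: alternative, same cost).

-- ===== PORT A =====
def zeit (p : Int) (z : List (Int × Int)) : Int :=
  -- t = 0; for i in range(len(z)-1): if z[i][0]==p: t += z[i+1][1]-z[i][1]
  let t := (PySem.List.pyRange 0 ((z.length : Int) - 1) 1).foldl
    (fun t i =>
      if (PySem.List.pyGetD z i (0, 0)).1 == p then
        t + ((PySem.List.pyGetD z (i + 1) (0, 0)).2 - (PySem.List.pyGetD z i (0, 0)).2)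
      else t) 0
  -- if z[-1][0]==p: t += (1440 - z[-1][1]) + z[0][1]
  if (PySem.List.pyGetD z (-1) (0, 0)).1 == p then
    t + ((1440 - (PySem.List.pyGetD z (-1) (0, 0)).2) + (PySem.List.pyGetD z 0 (0, 0)).2)
  else t

-- ===== PORT B =====
def zeit_alt (p : Int) (z : List (Int × Int)) : Int :=
  -- t = 1440 if z[-1][0] == p else 0; prev = z[-1][0]
  let last := PySem.List.pyGetD z (-1) (0, 0)
  let t0 : Int := if last.1 == p then 1440 else 0
  -- for q, s in z: if prev == p: t += s; if q == p: t -= s; prev = q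
  (z.foldl (fun (st : Int × Int) (qs : Int × Int) =>
      let t1 := if st.2 == p then st.1 + qs.2 else st.1
      let t2 := if qs.1 == p then t1 - qs.2 else t1
      (t2, qs.1)) (t0, last.1)).1

-- ===== PRECONDITION & SPEC =====
-- Pre_ excludes only the empty schedule, on which Python A raises IndexError at z[-1].
def Pre_zeit (p : Int) (z : List (Int × Int)) : Prop := z ≠ []
instance (p : Int) (z : List (Int × Int)) : Decidable (Pre_zeit p z) := by unfold Pre_zeit; infer_instance
def pvWitness_zeit : Int × (List (Int × Int)) := (1, [(1, 100), (2, 200), (1, 300)])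

def Spec_zeit (p : Int) (z : List (Int × Int)) (out : Int) : Prop := out = zeit_alt p z
instance (p : Int) (z : List (Int × Int)) (out : Int) : Decidable (Spec_zeit p z out) := by unfold Spec_zeit; infer_instance

-- ===== CLAIM (what is proved, stated in full; the proofs are below) =====
def Claim_equal_zeit : Prop := ∀ (p : Int) (z : List (Int × Int)), Dom_zeit p z → Pre_zeit p z → Spec_zeit p z (zeit p z)

-- ===== LEMMAS AND PROOFS =====

-- adjacency gap sum: Σ_{i<n-1} [z i matches p] (start (i+1) - start i)
def pvSA (p : Int) : List (Int × Int) → Int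
  | [] => 0
  | [_] => 0
  | x :: y :: r => (if x.1 == p then y.2 - x.2 else 0) + pvSA p (y :: r)

-- signed contribution sum with a running previous id
def pvSB (p : Int) (prev : Int) : List (Int × Int) → Int
  | [] => 0
  | (q, s) :: r => (if prev == p then s else 0) - (if q == p then s else 0) + pvSB p q r

theorem pvB_foldl (p : Int) : ∀ (l : List (Int × Int)) (t prev : Int),
    (l.foldl (fun (st : Int × Int) (qs : Int × Int) =>
      let t1 := if st.2 == p then st.1 + qs.2 else st.1
      let t2 := if qs.1 == p then t1 - qs.2 else t1
      (t2, qs.1)) (t, prev)).1 = t + pvSB p prev l := by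
  intro l
  induction l with
  | nil => intro t prev; simp [pvSB]
  | cons x r ih =>
      intro t prev
      obtain ⟨q, s⟩ := x
      simp only [List.foldl_cons, ih, pvSB]
      split_ifs <;> ring

theorem pvA_zip_foldl (p : Int) : ∀ (z : List (Int × Int)) (t : Int),
    ((z.zip z.tail).foldl
      (fun t (pr : (Int × Int) × (Int × Int)) =>
        if pr.1.1 == p then t + (pr.2.2 - pr.1.2) else t) t) = t + pvSA p z := by
  intro z
  induction z with
  | nil => intro t; simp [pvSA]
  | cons x r ih =>
      intro t
      cases r with
      | nil => simp [pvSA]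
      | cons y r' =>
          simp only [List.tail_cons, List.zip_cons_cons, List.foldl_cons]
          have := ih (t := if x.1 == p then t + (y.2 - x.2) else t)
          simp only [List.tail_cons] at this
          rw [this]
          show _ = t + pvSA p (x :: y :: r')
          simp only [pvSA]
          split_ifs <;> ring

theorem pvSB_eq_SA (p : Int) : ∀ (r : List (Int × Int)) (x : Int × Int) (prev : Int),
    pvSB p prev (x :: r) = pvSA p (x :: r)
      + (if prev == p then x.2 else 0)
      - (if ((x :: r).getLast (by simp)).1 == p then ((x :: r).getLast (by simp)).2 else 0) := by
  intro r
  induction r with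
  | nil =>
      intro x prev
      obtain ⟨q, s⟩ := x
      simp only [pvSB, pvSA, List.getLast_singleton]
      ring
  | cons y r' ih =>
      intro x prev
      obtain ⟨q, s⟩ := x
      have hlast : ((⟨q, s⟩ : Int × Int) :: y :: r').getLast (by simp)
          = (y :: r').getLast (by simp) := List.getLast_cons _
      rw [show pvSB p prev ((q, s) :: y :: r')
            = (if prev == p then s else 0) - (if q == p then s else 0) + pvSB p q (y :: r')
          from rfl]
      rw [ih y q, hlast]
      rw [show pvSA p ((q, s) :: y :: r')
            = (if q == p then y.2 - s else 0) + pvSA p (y :: r') from rfl]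
      split_ifs <;> ring

theorem zeit_eq_alt (p : Int) (z : List (Int × Int)) (hz : z ≠ []) :
    zeit p z = zeit_alt p z := by
  obtain ⟨x, r, rfl⟩ : ∃ x r, z = x :: r := by
    cases z with
    | nil => exact absurd rfl hz
    | cons x r => exact ⟨x, r, rfl⟩
  set z := x :: r with hzdef
  have hne : z ≠ [] := by simp [hzdef]
  obtain ⟨n, hn⟩ : ∃ n : ℕ, z.length = n + 1 := ⟨r.length, by simp [hzdef]⟩
  -- the last and first elements
  have hlast : PySem.List.pyGetD z (-1) (0, 0) = z.getLast hne :=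
    PySem.List.pyGetD_neg_one z (0, 0) hne
  have hhead : PySem.List.pyGetD z 0 (0, 0) = x := by
    rw [PySem.List.pyGetD_eq_getElem z (i := 0) (0, 0) (by norm_num) (by rw [hn]; push_cast; omega)]
    simp [hzdef]
  -- the zipped adjacency list
  set w := z.zip z.tail with hwdef
  have hwlen : (w.length : Int) = (z.length : Int) - 1 := by
    simp only [hwdef, List.length_zip, List.length_tail]
    omega
  -- A's indexed loop is the fold over the zipped list
  have hbody : ∀ (acc : Int) (i : Int), i ∈ PySem.List.pyRange 0 (w.length : Int) 1 →
      (fun t i =>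
        if (PySem.List.pyGetD z i (0, 0)).1 == p then
          t + ((PySem.List.pyGetD z (i + 1) (0, 0)).2 - (PySem.List.pyGetD z i (0, 0)).2)
        else t) acc i
      = (fun t i =>
          (fun t (pr : (Int × Int) × (Int × Int)) =>
            if pr.1.1 == p then t + (pr.2.2 - pr.1.2) else t) t
            (PySem.List.pyGetD w i ((0,0),(0,0)))) acc i := by
    intro acc i hi
    rw [PySem.List.mem_pyRange_one] at hi
    obtain ⟨hi0, hi1⟩ := hi
    have hiw : i.toNat < w.length := by omega
    have hiz : i.toNat < z.length := by
      simp only [hwdef, List.length_zip, List.length_tail] at hiw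
      omega
    have hiz1 : i.toNat + 1 < z.length := by
      simp only [hwdef, List.length_zip, List.length_tail] at hiw
      omega
    have hw : PySem.List.pyGetD w i ((0,0),(0,0)) = (z[i.toNat], z[i.toNat + 1]) := by
      rw [PySem.List.pyGetD_eq_getElem w (i := i) ((0,0),(0,0)) hi0 (by omega)]
      simp only [hwdef, List.getElem_zip, List.getElem_tail]
    have h1 : PySem.List.pyGetD z i (0, 0) = z[i.toNat] := by
      rw [PySem.List.pyGetD_eq_getElem z (i := i) (0, 0) hi0 (by push_cast; omega)]
    have h2 : PySem.List.pyGetD z (i + 1) (0, 0) = z[i.toNat + 1] := by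
      rw [PySem.List.pyGetD_eq_getElem z (i := i + 1) (0, 0) (by omega) (by push_cast; omega)]
      congr 1
      omega
    dsimp only
    rw [hw, h1, h2]
  have hbridge : (PySem.List.pyRange 0 ((z.length : Int) - 1) 1).foldl
      (fun t i =>
        if (PySem.List.pyGetD z i (0, 0)).1 == p then
          t + ((PySem.List.pyGetD z (i + 1) (0, 0)).2 - (PySem.List.pyGetD z i (0, 0)).2)
        else t) 0
      = w.foldl (fun t (pr : (Int × Int) × (Int × Int)) =>
          if pr.1.1 == p then t + (pr.2.2 - pr.1.2) else t) 0 := by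
    rw [← hwlen]
    exact (PySem.List.foldl_congr_mem _ _ _ 0 hbody).trans
      (PySem.List.foldl_pyRange_zero_pyGetD' w ((0,0),(0,0))
        (fun t (pr : (Int × Int) × (Int × Int)) =>
          if pr.1.1 == p then t + (pr.2.2 - pr.1.2) else t) 0)
  unfold zeit zeit_alt
  rw [hbridge, pvA_zip_foldl p z 0, hlast, hhead]
  rw [pvB_foldl p z _ ((z.getLast hne).1)]
  rw [show pvSB p ((z.getLast hne).1) z
        = pvSA p z + (if (z.getLast hne).1 == p then x.2 else 0)
          - (if ((x :: r).getLast (by simp)).1 == p then ((x :: r).getLast (by simp)).2 else 0)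
      from pvSB_eq_SA p r x ((z.getLast hne).1)]
  split_ifs <;> ring

-- ===== VERDICT (by name: the statement is the Claim_ definition above) =====
theorem zeit_spec : Claim_equal_zeit := by
  intro p z _ hpre
  unfold Spec_zeit
  exact zeit_eq_alt p z hpre
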